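-- pv_equiv track=rewrite | github.com/miczek2309/logia | najwieksza_suma_oddalona_o_3.py | najwieksza_suma_oddalona_o_3
-- ===== SOURCE A (Python) =====
-- def najwieksza_suma_oddalona_o_3(N):
--     u = 3
--     reka = 0
--     for i in N:
--         for x in N[u:]:
--             if i + x > reka:
--                 reka = i + x
--         u = u + 1
--     return reka
-- ===== SOURCE B (Python) =====
-- def najwieksza_suma_oddalona_o_3(N):
--     best = None          # max of elements at index >= (current index)+3
--     w1 = w2 = w3 = None  # sliding window of the next three elements
--     reka = 0
--     for x in reversed(N):
--         if w3 is not None: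
--             best = w3 if best is None else max(best, w3)
--         if best is not None and x + best > reka:
--             reka = x + best
--         w3, w2, w1 = w2, w1, x
--     return reka
-- ===== Notes on version B (the rewrite author's own statement) =====
-- stated objective: faster
-- what changed: Replaced A's double loop (each element paired with every element of the slice N[u:]) by a single right-to-left pass that keeps a 3-element sliding window and a running suffix maximum, combining each element with the max of elements at least 3 positions to its right.
import Mathlib
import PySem

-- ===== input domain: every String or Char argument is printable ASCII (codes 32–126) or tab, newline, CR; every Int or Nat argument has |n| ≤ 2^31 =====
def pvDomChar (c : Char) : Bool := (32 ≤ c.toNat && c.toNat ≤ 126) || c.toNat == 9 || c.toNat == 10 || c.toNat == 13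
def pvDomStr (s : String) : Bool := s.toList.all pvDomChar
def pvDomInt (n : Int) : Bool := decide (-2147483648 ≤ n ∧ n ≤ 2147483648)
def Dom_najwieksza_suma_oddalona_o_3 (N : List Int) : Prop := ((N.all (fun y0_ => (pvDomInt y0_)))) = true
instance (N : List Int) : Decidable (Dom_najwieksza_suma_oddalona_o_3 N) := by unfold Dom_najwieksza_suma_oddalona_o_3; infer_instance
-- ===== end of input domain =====

-- B replaces A's quadratic double loop (every element against the slice N[u:]) by a single
-- right-to-left pass keeping a 3-element window and a running suffix maximum: O(n) vs O(n^2).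

-- ===== PORT A =====
-- state (u, reka); inner loop over the slice N[u:]
def najwieksza_suma_oddalona_o_3 (N : List Int) : Int :=
  (N.foldl
    (fun (st : Int × Int) i =>
      (st.1 + 1,
        (PySem.List.slice N (some st.1) none).foldl
          (fun reka x => if i + x > reka then i + x else reka) st.2))
    (3, 0)).2

-- ===== PORT B =====
-- state (best, w1, w2, w3, reka): suffix max beyond the window, the 3-element window, the answer
def najwieksza_suma_oddalona_o_3_alt (N : List Int) : Int :=
  (N.reverse.foldl
    (fun (st : Option Int × Option Int × Option Int × Option Int × Int) x =>
      let best :=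
        match st.2.2.2.1 with
        | none => st.1
        | some v => some (match st.1 with | none => v | some b => max b v)
      let reka :=
        match best with
        | none => st.2.2.2.2
        | some b => if x + b > st.2.2.2.2 then x + b else st.2.2.2.2
      (best, some x, st.2.1, st.2.2.1, reka))
    (none, none, none, none, 0)).2.2.2.2

-- ===== PRECONDITION & SPEC =====
def Spec_najwieksza_suma_oddalona_o_3 (N : List Int) (out : Int) : Prop := out = najwieksza_suma_oddalona_o_3_alt N
instance (N : List Int) (out : Int) : Decidable (Spec_najwieksza_suma_oddalona_o_3 N out) := by unfold Spec_najwieksza_suma_oddalona_o_3; infer_instance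

-- ===== CLAIM (what is proved, stated in full; the proofs are below) =====
def Claim_equal_najwieksza_suma_oddalona_o_3 : Prop := ∀ (N : List Int), Dom_najwieksza_suma_oddalona_o_3 N → Spec_najwieksza_suma_oddalona_o_3 N (najwieksza_suma_oddalona_o_3 N)

-- ===== LEMMAS AND PROOFS =====

-- A's inner loop
def pvInner (i : Int) (l : List Int) (r : Int) : Int :=
  l.foldl (fun reka x => if i + x > reka then i + x else reka) r

-- A's outer loop, with the slice made explicit as a drop of the original list
def pvLoopA (orig : List Int) : List Int → Nat → Int → Int
  | [], _, r => r
  | i :: t, u, r => pvLoopA orig t (u + 1) (pvInner i (orig.drop u) r)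

-- maximum of a list (none for empty)
def pvM : List Int → Option Int
  | [] => none
  | a :: t => some (match pvM t with | none => a | some m => max a m)

-- the common specification: max 0 of all sums N[i] + N[j] with j ≥ i + 3
def pvS : List Int → Int
  | [] => 0
  | a :: t =>
    match pvM (t.drop 2) with
    | none => pvS t
    | some m => max (pvS t) (a + m)

theorem pvInner_step (i x : Int) (l : List Int) (r : Int) :
    pvInner i (x :: l) r = pvInner i l (max r (i + x)) := by
  simp only [pvInner, List.foldl_cons]
  congr 1
  omega

theorem pvInner_seed (i : Int) (l : List Int) (c r : Int) :
    pvInner i l (max c r) = max c (pvInner i l r) := by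
  induction l generalizing r with
  | nil => simp [pvInner]
  | cons x l ih =>
    rw [pvInner_step, pvInner_step]
    have : max (max c r) (i + x) = max c (max r (i + x)) := by omega
    rw [this, ih]

theorem pvInner_M (i : Int) (l : List Int) :
    pvInner i l 0 = match pvM l with | none => 0 | some m => max 0 (i + m) := by
  induction l with
  | nil => simp [pvInner, pvM]
  | cons x l ih =>
    rw [pvInner_step]
    have h : max (0 : Int) (i + x) = max (i + x) 0 := by omega
    rw [h, pvInner_seed, ih]
    cases hl : pvM l with
    | none =>
        simp only [pvM, hl]
        exact max_comm _ _
    | some m =>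
        simp only [pvM, hl]
        rw [← max_add_add_left i x m, max_left_comm]

theorem pvInner_nonneg (i : Int) (l : List Int) : 0 ≤ pvInner i l 0 := by
  rw [pvInner_M]
  cases pvM l with
  | none => simp
  | some m => simp

theorem pvLoopA_shift (c : Int) (orig t : List Int) (u : Nat) (r : Int) :
    pvLoopA (c :: orig) t (u + 1) r = pvLoopA orig t u r := by
  induction t generalizing u r with
  | nil => simp [pvLoopA]
  | cons i t ih => simp [pvLoopA, List.drop_succ_cons, ih]

theorem pvLoopA_seed (orig t : List Int) (u : Nat) (c r : Int) :
    pvLoopA orig t u (max c r) = max c (pvLoopA orig t u r) := by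
  induction t generalizing u r with
  | nil => simp [pvLoopA]
  | cons i t ih => simp [pvLoopA, pvInner_seed, ih]

-- the foldl in port A is pvLoopA
theorem pvA_eq_loopA (N : List Int) : ∀ (t : List Int) (k : Nat) (r : Int),
    (t.foldl
      (fun (st : Int × Int) i =>
        (st.1 + 1,
          (PySem.List.slice N (some st.1) none).foldl
            (fun reka x => if i + x > reka then i + x else reka) st.2))
      ((k : Int), r)).2 = pvLoopA N t k r := by
  intro t
  induction t with
  | nil => intro k r; simp [pvLoopA]
  | cons i t ih =>
    intro k r
    have hc : ((k : Int) + 1) = ((k + 1 : Nat) : Int) := by push_cast; ring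
    simp only [List.foldl_cons, hc, ih]
    rw [PySem.List.slice_from _ (by positivity : (0:Int) ≤ (k:Int))]
    simp [pvLoopA, pvInner]

theorem pvA_def (N : List Int) : najwieksza_suma_oddalona_o_3 N = pvLoopA N N 3 0 := by
  have := pvA_eq_loopA N N 3 0
  simpa [najwieksza_suma_oddalona_o_3] using this

theorem pvA_rec (a : Int) (t : List Int) :
    najwieksza_suma_oddalona_o_3 (a :: t)
      = max (pvInner a (t.drop 2) 0) (najwieksza_suma_oddalona_o_3 t) := by
  rw [pvA_def, pvA_def]
  show pvLoopA (a :: t) (a :: t) 3 0 = _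
  rw [pvLoopA]
  rw [pvLoopA_shift]
  have h1 : (a :: t).drop 3 = t.drop 2 := by simp
  rw [h1]
  have h2 : pvInner a (t.drop 2) 0 = max (pvInner a (t.drop 2) 0) 0 := by
    have := pvInner_nonneg a (t.drop 2); omega
  conv_lhs => rw [h2]
  rw [pvLoopA_seed]

theorem pvS_nonneg (l : List Int) : 0 ≤ pvS l := by
  induction l with
  | nil => simp [pvS]
  | cons a t ih =>
    rw [pvS]
    cases pvM (t.drop 2) with
    | none => exact ih
    | some m => exact le_trans ih (le_max_left _ _)

theorem pvA_eq_S (N : List Int) : najwieksza_suma_oddalona_o_3 N = pvS N := by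
  induction N with
  | nil => rw [pvA_def]; rfl
  | cons a t ih =>
    rw [pvA_rec, ih, pvInner_M, pvS]
    have hS := pvS_nonneg t
    cases pvM (t.drop 2) with
    | none => exact max_eq_right hS
    | some m =>
        rw [max_assoc, max_comm (a + m) (pvS t)]
        exact max_eq_right (le_trans hS (le_max_left _ _))

-- B invariant: after folding t.reverse, the state is
-- (max of t[3:], t[0]?, t[1]?, t[2]?, pvS t)
theorem pvB_inv (t : List Int) :
    (t.reverse.foldl
      (fun (st : Option Int × Option Int × Option Int × Option Int × Int) x =>
        let best :=
          match st.2.2.2.1 with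
          | none => st.1
          | some v => some (match st.1 with | none => v | some b => max b v)
        let reka :=
          match best with
          | none => st.2.2.2.2
          | some b => if x + b > st.2.2.2.2 then x + b else st.2.2.2.2
        (best, some x, st.2.1, st.2.2.1, reka))
      (none, none, none, none, 0))
    = (pvM (t.drop 3), t[0]?, t[1]?, t[2]?, pvS t) := by
  induction t with
  | nil => rfl
  | cons b s ih =>
    rw [List.reverse_cons, List.foldl_append, ih]
    simp only [List.foldl_cons, List.foldl_nil]
    have hdrop : (b :: s).drop 3 = s.drop 2 := by simp
    rw [hdrop]
    have hbest :
        (match s[2]? with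
          | none => pvM (s.drop 3)
          | some v => some (match pvM (s.drop 3) with | none => v | some bb => max bb v))
        = pvM (s.drop 2) := by
      match s with
      | [] => rfl
      | [_] => rfl
      | [_, _] => rfl
      | _ :: _ :: z :: s' =>
        simp only [List.getElem?_cons_succ, List.getElem?_cons_zero, List.drop]
        rw [pvM]
        cases pvM s' with
        | none => rfl
        | some m => simp [max_comm]
    have hreka :
        (match pvM (s.drop 2) with
          | none => pvS s
          | some bb => if b + bb > pvS s then b + bb else pvS s)
        = pvS (b :: s) := by
      rw [pvS]
      cases pvM (s.drop 2) with
      | none => rfl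
      | some m =>
          show (if b + m > pvS s then b + m else pvS s) = max (pvS s) (b + m)
          by_cases h : b + m > pvS s
          · rw [if_pos h]
            exact (max_eq_right (le_of_lt h)).symm
          · rw [if_neg h]
            exact (max_eq_left (le_of_not_gt h)).symm
    simp only [hbest, hreka]
    rfl

theorem pvB_eq_S (N : List Int) : najwieksza_suma_oddalona_o_3_alt N = pvS N := by
  unfold najwieksza_suma_oddalona_o_3_alt
  rw [pvB_inv]

-- ===== VERDICT (by name: the statement is the Claim_ definition above) =====
theorem najwieksza_suma_oddalona_o_3_spec : Claim_equal_najwieksza_suma_oddalona_o_3 := by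
  intro N _
  unfold Spec_najwieksza_suma_oddalona_o_3
  rw [pvA_eq_S, pvB_eq_S]
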